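-- pv_equiv track=rewrite | github.com/TechnoBlogger14o3/leetcode-solutions | Medium/2025-08-21-1504-CountSubmatricesWithAllOnes/solution.py | count_submatrices_at
-- ===== SOURCE A (Python) =====
-- from typing import List
--
-- def count_submatrices_at(mat: List[List[int]], row: int, col: int) -> int:
--     count = 0
--     max_width = float('inf')
--
--     # Try different heights starting from current row
--     for height in range(row + 1):
--         consecutive_ones = 0
--
--         # Count consecutive 1s in current row
--         for j in range(col, -1, -1):
--             if mat[row - height][j] == 1:
--                 consecutive_ones += 1
--             else:
--                 break
--
--         # Update maxWidth to be the minimum of all rows in current height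
--         max_width = min(max_width, consecutive_ones)
--
--         # Add count for current height and width
--         count += max_width
--
--     return count
-- ===== SOURCE B (Python) =====
-- from typing import List
--
-- def _width(r: List[int], col: int) -> int:
--     # length of the run of 1s in r ending at index col, scanning leftward
--     seg = r[:col + 1][::-1]
--     return next((i for i, v in enumerate(seg) if v != 1), len(seg))
--
-- def count_submatrices_at(mat: List[List[int]], row: int, col: int) -> int:
--     # Two separate passes: collect each row's run-of-ones width ending at col,
--     # then sum the prefix minima of that widths list.
--     if col < 0:
--         return 0
--     widths = [_width(mat[r], col) for r in range(row, -1, -1)]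
--     return sum(min(widths[:h + 1]) for h in range(len(widths)))
-- ===== Notes on version B (the rewrite author's own statement) =====
-- stated objective: alternative
-- what changed: Interleaved single pass carrying a running (count, max_width) state is replaced by two separate passes: first a table of per-row run-of-ones widths (computed by slicing and finding the first non-1), then the answer as the sum of prefix minima of that table.
import Mathlib
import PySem

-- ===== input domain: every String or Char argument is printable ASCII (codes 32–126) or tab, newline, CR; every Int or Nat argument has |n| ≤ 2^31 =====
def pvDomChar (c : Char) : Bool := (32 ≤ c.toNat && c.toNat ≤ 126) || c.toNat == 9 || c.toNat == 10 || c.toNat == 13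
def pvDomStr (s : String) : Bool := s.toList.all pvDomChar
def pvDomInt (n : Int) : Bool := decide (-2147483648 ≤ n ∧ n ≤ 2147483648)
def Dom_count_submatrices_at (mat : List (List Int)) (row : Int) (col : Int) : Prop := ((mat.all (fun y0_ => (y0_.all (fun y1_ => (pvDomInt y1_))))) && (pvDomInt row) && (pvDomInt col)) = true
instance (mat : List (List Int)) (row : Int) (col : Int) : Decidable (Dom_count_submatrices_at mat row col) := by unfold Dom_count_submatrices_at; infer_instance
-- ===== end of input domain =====

-- B replaces A's interleaved single pass (running count and running max_width) by two
-- separate passes: a table of per-row run widths, then the sum of its prefix minima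
-- (alternative decomposition, not claimed faster).

-- ===== PORT A =====
-- inner loop 'for j in range(col, -1, -1): … else break' as structural recursion over the index list
def pvInnerA (r : List Int) : List Int → Int → Int
  | [], acc => acc
  | j :: js, acc =>
    if PySem.List.pyGetD r j 0 = 1 then pvInnerA r js (acc + 1) else acc

-- 'min(max_width, w)' where max_width starts at float('inf'): none models inf (exact on ints)
def pvMinInf (o : Option Int) (w : Int) : Int :=
  match o with
  | none => w
  | some m => min m w

-- the body of A's 'for height in range(row + 1)' loop; state = (count, max_width)
def pvStepA (mat : List (List Int)) (row : Int) (col : Int)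
    (st : Int × Option Int) (height : Int) : Int × Option Int :=
  let consecutive_ones :=
    pvInnerA (PySem.List.pyGetD mat (row - height) []) (PySem.List.pyRange col (-1) (-1)) 0
  let max_width := pvMinInf st.2 consecutive_ones
  (st.1 + max_width, some max_width)

def count_submatrices_at (mat : List (List Int)) (row : Int) (col : Int) : Int :=
  ((PySem.List.pyRange 0 (row + 1) 1).foldl (pvStepA mat row col) (0, none)).1

-- ===== PORT B =====
-- _width: seg = r[:col+1][::-1]; next((i for i,v in enumerate(seg) if v != 1), len(seg))
def pvWidthB (r : List Int) (col : Int) : Int :=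
  let seg := (PySem.List.slice? (PySem.List.slice r none (some (col + 1))) none none (-1)).getD []
  ((seg.findIdx (fun v => !(v == 1)) : Nat) : Int)

def count_submatrices_at_alt (mat : List (List Int)) (row : Int) (col : Int) : Int :=
  if col < 0 then 0
  else
    let widths := (PySem.List.pyRange row (-1) (-1)).map
      (fun r => pvWidthB (PySem.List.pyGetD mat r []) col)
    ((List.range widths.length).map (fun h => ((widths.take (h + 1)).min?).getD 0)).sum

-- ===== PRECONDITION & SPEC =====
-- A raises IndexError exactly when (with row ≥ 0 and col ≥ 0) row is past the end of mat
-- or some row 0..row is shorter than col+1; Pre_ excludes exactly those inputs.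
def Pre_count_submatrices_at (mat : List (List Int)) (row : Int) (col : Int) : Prop :=
  0 ≤ row → 0 ≤ col →
    (row < (mat.length : Int) ∧ ∀ l ∈ mat.take (row.toNat + 1), col < (l.length : Int))
instance (mat : List (List Int)) (row : Int) (col : Int) : Decidable (Pre_count_submatrices_at mat row col) := by unfold Pre_count_submatrices_at; infer_instance

def pvWitness_count_submatrices_at : List (List Int) × Int × Int := ([[1, 1], [0, 1]], 1, 1)

def Spec_count_submatrices_at (mat : List (List Int)) (row : Int) (col : Int) (out : Int) : Prop := out = count_submatrices_at_alt mat row col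
instance (mat : List (List Int)) (row : Int) (col : Int) (out : Int) : Decidable (Spec_count_submatrices_at mat row col out) := by unfold Spec_count_submatrices_at; infer_instance

-- ===== CLAIM (what is proved, stated in full; the proofs are below) =====
def Claim_equal_count_submatrices_at : Prop := ∀ (mat : List (List Int)) (row : Int) (col : Int), Dom_count_submatrices_at mat row col → Pre_count_submatrices_at mat row col → Spec_count_submatrices_at mat row col (count_submatrices_at mat row col)

-- ===== LEMMAS AND PROOFS =====

-- sum of prefix minima, written as the recursion A's running state performs
def pvSps : Option Int → List Int → Int
  | _, [] => 0
  | o, w :: ws => pvMinInf o w + pvSps (some (pvMinInf o w)) ws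

theorem pvStepA_foldl (mat : List (List Int)) (row col : Int) :
    ∀ (hs : List Int) (c : Int) (o : Option Int),
      (hs.foldl (pvStepA mat row col) (c, o)).1 =
        c + pvSps o (hs.map (fun h =>
          pvInnerA (PySem.List.pyGetD mat (row - h) []) (PySem.List.pyRange col (-1) (-1)) 0)) := by
  intro hs
  induction hs with
  | nil => intro c o; simp [pvSps]
  | cons h t ih =>
    intro c o
    simp only [List.foldl_cons, List.map_cons, pvSps, pvStepA]
    rw [ih]
    ring

theorem pvSps_zero_rep : ∀ (n : Nat) (o : Option Int),
    (o = none ∨ o = some 0) → pvSps o (List.replicate n 0) = 0 := by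
  intro n
  induction n with
  | zero => intro o _; simp [pvSps]
  | succ n ih =>
    intro o ho
    simp only [List.replicate_succ, pvSps]
    rcases ho with h | h <;> subst h <;> simp [pvMinInf, ih (some 0) (Or.inr rfl)]

theorem pvSps_map_zero {α : Type} (l : List α) (o : Option Int)
    (ho : o = none ∨ o = some 0) : pvSps o (l.map (fun _ => (0 : Int))) = 0 := by
  rw [List.map_const']
  exact pvSps_zero_rep l.length o ho

theorem pvSum_take_foldl_min : ∀ (t : List Int) (m : Int),
    ((List.range t.length).map (fun h => (t.take (h + 1)).foldl min m)).sum = pvSps (some m) t := by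
  intro t
  induction t with
  | nil => intro m; simp [pvSps]
  | cons w t ih =>
    intro m
    simp only [List.length_cons, List.range_succ_eq_map, List.map_cons, List.map_map,
      Function.comp_def, List.take_succ_cons, List.foldl_cons, List.sum_cons, pvSps, pvMinInf,
      List.take_zero, List.foldl_nil, Nat.succ_eq_add_one]
    rw [ih (min m w)]

theorem pvMinGetD (l : List Int) (w : Int) : (w :: l).min?.getD 0 = l.foldl min w := by
  induction l generalizing w with
  | nil => simp
  | cons x t ih =>
    have h1 := ih (min w x)
    simp only [List.min?_cons, Option.getD_some] at h1 ⊢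
    rw [List.foldl_cons, ← h1]
    cases t.min? <;> simp [Option.elim, min_assoc]

theorem pvSum_take_min? : ∀ (ws : List Int),
    ((List.range ws.length).map (fun h => ((ws.take (h + 1)).min?).getD 0)).sum = pvSps none ws := by
  intro ws
  cases ws with
  | nil => simp [pvSps]
  | cons w t =>
    simp only [List.length_cons, List.range_succ_eq_map, List.map_cons, List.map_map,
      Function.comp_def, List.take_succ_cons, List.sum_cons, Nat.succ_eq_add_one,
      pvMinGetD, List.take_zero, List.foldl_nil, pvSps, pvMinInf]
    rw [pvSum_take_foldl_min t w]

-- leading-ones count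
def pvLead1 : List Int → Int
  | [] => 0
  | x :: xs => if x = 1 then 1 + pvLead1 xs else 0

theorem pvInnerA_lead (r : List Int) : ∀ (js : List Int) (acc : Int),
    pvInnerA r js acc = acc + pvLead1 (js.map (fun j => PySem.List.pyGetD r j 0)) := by
  intro js
  induction js with
  | nil => intro acc; simp [pvInnerA, pvLead1]
  | cons j t ih =>
    intro acc
    simp only [pvInnerA, List.map_cons, pvLead1]
    by_cases h : PySem.List.pyGetD r j 0 = 1
    · simp [h, ih]; ring
    · simp [h]

theorem pvFindIdx_lead : ∀ (l : List Int),
    ((l.findIdx (fun v => !(v == 1)) : Nat) : Int) = pvLead1 l := by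
  intro l
  induction l with
  | nil => simp [pvLead1, List.findIdx_nil]
  | cons x t ih =>
    by_cases h : x = 1
    · simp [List.findIdx_cons, h, pvLead1, ← ih]; ring
    · have hb : (x == 1) = false := by simpa using h
      simp [List.findIdx_cons, h, hb, pvLead1]

theorem pvMap_range_get_rev (r : List Int) (c : Nat) (h : c < r.length) :
    (List.range (c + 1)).map (fun (k : Nat) => PySem.List.pyGetD r ((c : Int) - (k : Int)) 0) =
      (r.take (c + 1)).reverse := by
  apply List.ext_getElem
  · simp; omega
  · intro i h1 h2
    simp only [List.getElem_map, List.getElem_range, List.getElem_reverse, List.getElem_take]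
    have hi : i < c + 1 := by simpa using h1
    rw [PySem.List.pyGetD_eq_getElem r 0 (by omega) (by omega)]
    congr 1
    simp at h2 ⊢
    omega

theorem pvWidth_eq (r : List Int) (col : Int) (h0 : 0 ≤ col) (h1 : col < (r.length : Int)) :
    pvInnerA r (PySem.List.pyRange col (-1) (-1)) 0 = pvWidthB r col := by
  obtain ⟨c, rfl⟩ : ∃ c : Nat, col = (c : Int) := ⟨col.toNat, by omega⟩
  have hlen : c < r.length := by exact_mod_cast h1
  unfold pvWidthB
  rw [PySem.List.slice?_none_none_neg_one]
  simp only [Option.getD_some]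
  rw [PySem.List.slice_to r (by omega)]
  have ht : ((c : Int) + 1).toNat = c + 1 := by omega
  rw [ht]
  rw [PySem.List.pyRange_neg_one]
  have ha : ((c : Int) - (-1)).toNat = c + 1 := by omega
  rw [ha]
  rw [pvInnerA_lead, List.map_map]
  simp only [Function.comp_def]
  rw [pvMap_range_get_rev r c hlen, pvFindIdx_lead]
  ring

-- ===== VERDICT (by name: the statement is the Claim_ definition above) =====
theorem count_submatrices_at_spec : Claim_equal_count_submatrices_at := by
  intro mat row col _ hpre
  unfold Spec_count_submatrices_at count_submatrices_at count_submatrices_at_alt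
  by_cases hcol : col < 0
  · -- inner range is empty, every width A computes is 0, count stays 0
    simp only [if_pos hcol]
    rw [pvStepA_foldl]
    rw [PySem.List.pyRange_neg_one_eq_nil (by omega : col ≤ -1)]
    simp only [pvInnerA]
    rw [pvSps_map_zero _ none (Or.inl rfl)]
    simp
  · simp only [if_neg hcol]
    by_cases hrow : row < 0
    · rw [pvStepA_foldl, PySem.List.pyRange_one_eq_nil (by omega : row + 1 ≤ 0),
        PySem.List.pyRange_neg_one_eq_nil (by omega : row ≤ -1)]
      simp [pvSps]
    · -- main case: 0 ≤ row, 0 ≤ col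
      obtain ⟨hlt, hcols⟩ := hpre (by omega) (by omega)
      rw [pvStepA_foldl]
      rw [PySem.List.pyRange_one 0 (row + 1), PySem.List.pyRange_neg_one row (-1)]
      have hn : (row + 1 - 0).toNat = (row - (-1)).toNat := by omega
      rw [hn]
      set n := (row - (-1)).toNat with hndef
      simp only [List.map_map, Function.comp_def]
      have hmaps : (List.range n).map (fun k : Nat =>
            pvInnerA (PySem.List.pyGetD mat (row - (0 + (k : Int))) [])
              (PySem.List.pyRange col (-1) (-1)) 0)
          = (List.range n).map (fun k : Nat =>
            pvWidthB (PySem.List.pyGetD mat (row - (k : Int)) []) col) := by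
        apply List.map_congr_left
        intro k hk
        have hk' : (k : Int) ≤ row := by
          have := List.mem_range.mp hk; omega
        have hidx : (0:Int) ≤ row - (0 + (k : Int)) := by omega
        rw [show row - (0 + (k : Int)) = row - (k : Int) by ring]
        have hin : (row - (k : Int)).toNat < mat.length := by omega
        have hrget : PySem.List.pyGetD mat (row - (k : Int)) [] = mat[(row - (k:Int)).toNat] :=
          PySem.List.pyGetD_eq_getElem mat [] (by omega) (by omega)
        have hmem : mat[(row - (k:Int)).toNat] ∈ mat.take (row.toNat + 1) := by
          have hlt2 : (row - (k:Int)).toNat < row.toNat + 1 := by omega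
          have : (mat.take (row.toNat + 1))[(row - (k:Int)).toNat]'(by simp; omega)
              = mat[(row - (k:Int)).toNat] := List.getElem_take ..
          rw [← this]
          exact List.getElem_mem _
        have hcl : col < ((mat[(row - (k:Int)).toNat]).length : Int) := hcols _ hmem
        rw [hrget]
        exact pvWidth_eq _ col (by omega) hcl
      rw [hmaps]
      rw [pvSum_take_min?]
      ring
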